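-- pv_equiv track=rewrite | github.com/Daniel-Fan/CSCA08 | Assignment1/a1.py | zip_length
-- ===== SOURCE A (Python) =====
-- def pair_model(nucleotide1, nucleotide2):
--     '''(str, str) -> True
--     the function return true iff two nucleotides can be paired
--     A can pair with T and C can pair with G.
--     REQ: nucleotide is single character that should only be A, T, G or C.
--     >>> pair_model('A', 'T')
--     True
--     >>> pair_model('A', 'G')
--     False
--     '''
--     # assume the result is False firstly
--     result = False
--     # nucleotide1 is A
--     if(nucleotide1 == 'A'):
--         # nucleotide2 is T
--         if(nucleotide2 == 'T'):
--             # two nucleotides can pair, result is True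
--             result = True
--     # nucleotide1 is T
--     elif(nucleotide1 == 'T'):
--         # nucleotide2 is A
--         if(nucleotide2 == 'A'):
--             # two nucleotides can pair, result is True
--             result = True
--     # nucleotide1 is C
--     elif(nucleotide1 == 'C'):
--         # nucleotide2 is G
--         if(nucleotide2 == 'G'):
--             # two nucleotides can pair, result is True
--             result = True
--     # nucleotide1 is G
--     elif(nucleotide1 == 'G'):
--         # nucleotide2 is C
--         if(nucleotide2 == 'C'):
--             # two nucleotides can pair, result is True
--             result = True
--     # get the result
--     return result
--
-- def zip_length(gene):
--     '''(str) -> int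
--     a gene to partially pair with itself,called zipping.
--     nucleotides at either end of a gene form a pair bond,
--     which may in turn allow the next nucleotides in from those genes to bond.
--     the process continues until a pair of nucleotides do not form a bondreturns
--     and return the maximum number of nucleotide pairs that this gene can zip.
--     REQ: gene should only contain A, T, G, C in strings
--     >>> zip_length('AGTGCGCACACT')
--     4
--     >>> zip_length('CGACG')
--     2
--     >>> zip_length('TAGCTA')
--     3
--     >>> zip_length('GTCAGCTAGCT')
--     0
--     '''
--     # assmue the gene can zip in current index
--     result_zip = True
--     # front index begins from 0 and rear index begins from -1
--     front_index = 0
--     rear_index = -1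
--     # loop the gene from either end of gene when front_index is less than
--     # half of the length of gene minus 1 and result_zip is True
--     while(front_index < (len(gene) - 1) / 2 and result_zip is True):
--         # if the nucleotides in gene[front_index] can pair with
--         # the nucleotide in gene[rear_index]
--         if(pair_model(gene[front_index], gene[rear_index])):
--             # the front_index increases 1 and rear_index decreases 1
--             front_index += 1
--             rear_index -= 1
--         # if the nucleotides cannot pair
--         else:
--             # result_zip is False
--             result_zip = False
--     # the maximum number of nucleotide pairs is equal to the front_index
--     # return the front_index
--     return front_index
-- ===== SOURCE B (Python) =====
-- def zip_length(gene):
--     pairs = {('A', 'T'), ('T', 'A'), ('C', 'G'), ('G', 'C')}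
--     n = len(gene)
--
--     def ok(k):
--         # the first k pairs (from both ends) all bond
--         return all((gene[i], gene[n - 1 - i]) in pairs for i in range(k))
--
--     # binary search for the largest k <= n // 2 with ok(k); ok is monotone
--     lo, hi = 0, n // 2
--     while lo < hi:
--         mid = (lo + hi + 1) // 2
--         if ok(mid):
--             lo = mid
--         else:
--             hi = mid - 1
--     return lo
-- ===== Notes on version B (the rewrite author's own statement) =====
-- stated objective: alternative
-- what changed: Replaced A's linear two-pointer inward walk by a binary search over the number of zipped pairs: the predicate that the first k end-pairs all bond is monotone in k, so B binary-searches for the largest k <= len(gene)//2 satisfying it, checking each candidate k with a set-membership all() over range(k).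
import Mathlib
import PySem

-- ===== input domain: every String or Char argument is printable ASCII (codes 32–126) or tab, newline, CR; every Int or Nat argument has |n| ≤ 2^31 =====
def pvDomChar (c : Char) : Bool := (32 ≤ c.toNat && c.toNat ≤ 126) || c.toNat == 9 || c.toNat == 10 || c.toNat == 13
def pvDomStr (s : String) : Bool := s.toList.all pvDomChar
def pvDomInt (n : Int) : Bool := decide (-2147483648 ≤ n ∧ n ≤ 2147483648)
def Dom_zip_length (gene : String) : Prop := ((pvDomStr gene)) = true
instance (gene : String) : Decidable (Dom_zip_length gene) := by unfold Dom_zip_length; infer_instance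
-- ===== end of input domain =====

-- B replaces A's linear two-pointer inward walk by a binary search for the largest k with
-- "the first k end-pairs all bond" (a monotone predicate); same return value on every string.

-- ===== PORT A =====
def pair_model (nucleotide1 nucleotide2 : Char) : Bool :=
  if nucleotide1 = 'A' then (if nucleotide2 = 'T' then true else false)
  else if nucleotide1 = 'T' then (if nucleotide2 = 'A' then true else false)
  else if nucleotide1 = 'C' then (if nucleotide2 = 'G' then true else false)
  else if nucleotide1 = 'G' then (if nucleotide2 = 'C' then true else false)
  else false

-- A's while loop; 'front_index < (len(gene)-1)/2' (Python float division, exact for ints of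
-- this size) is ported as the equivalent integer comparison 2*front < len-1.
-- 'fuel' is only a totalization guard (zip_length supplies more fuel than the loop can use);
-- the '| _, _ => front' arm is an IndexError guard, unreachable from zip_length's call.
def zipLoopA (cs : List Char) : Nat → Int → Int → Bool → Int
  | 0, front, _, _ => front
  | f + 1, front, rear, resultZip =>
    if 2 * front < (cs.length : Int) - 1 ∧ resultZip = true then
      match PySem.List.pyGet? cs front, PySem.List.pyGet? cs rear with
      | some a, some b =>
        if pair_model a b then zipLoopA cs f (front + 1) (rear - 1) resultZip
        else zipLoopA cs f front rear false
      | _, _ => front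
    else front

def zip_length (gene : String) : Int :=
  zipLoopA gene.toList (gene.toList.length + 1) 0 (-1) true

-- ===== PORT B =====
def pairsB : PySem.Set (Char × Char) :=
  PySem.Set.ofList [('A', 'T'), ('T', 'A'), ('C', 'G'), ('G', 'C')]

-- ok(k): all((gene[i], gene[n-1-i]) in pairs for i in range(k)).
-- The '| _, _ => false' arm is an IndexError guard, unreachable for the k bsearchB probes.
def okB (cs : List Char) (k : Int) : Bool :=
  (PySem.List.pyRange 0 k 1).all (fun i =>
    match PySem.List.pyGet? cs i with
    | none => false
    | some a =>
      match PySem.List.pyGet? cs ((cs.length : Int) - 1 - i) with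
      | none => false
      | some b => PySem.Set.contains pairsB (a, b))

-- the while-loop of B: binary search for the largest k in [lo, hi] with ok(k);
-- 'fuel' is only a totalization guard (zip_length_alt supplies more fuel than the loop can use)
def bsearchB (cs : List Char) : Nat → Int → Int → Int
  | 0, lo, _ => lo
  | f + 1, lo, hi =>
    if lo < hi then
      let mid := PySem.Int.floordiv (lo + hi + 1) 2
      if okB cs mid then bsearchB cs f mid hi else bsearchB cs f lo (mid - 1)
    else lo

def zip_length_alt (gene : String) : Int :=
  let hi := PySem.Int.floordiv (gene.toList.length : Int) 2
  bsearchB gene.toList (hi.toNat + 1) 0 hi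

-- ===== PRECONDITION & SPEC =====
def Spec_zip_length (gene : String) (out : Int) : Prop := out = zip_length_alt gene
instance (gene : String) (out : Int) : Decidable (Spec_zip_length gene out) := by unfold Spec_zip_length; infer_instance

-- ===== CLAIM =====
def Claim_equal_zip_length : Prop := ∀ (gene : String), Dom_zip_length gene → Spec_zip_length gene (zip_length gene)

-- ===== LEMMAS AND PROOFS =====

-- whether the i-th pair (from both ends) bonds
def goodP (cs : List Char) (i : Nat) : Bool :=
  match cs[i]?, cs[cs.length - 1 - i]? with
  | some a, some b => pair_model a b
  | _, _ => false

-- the common reference value: first mismatch index from k, capped at len/2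
def ansAux (cs : List Char) (k : Nat) : Nat :=
  if k < cs.length / 2 then (if goodP cs k then ansAux cs (k + 1) else k) else k
termination_by cs.length / 2 - k

lemma set_contains_eq_pair_model (a b : Char) :
    PySem.Set.contains pairsB (a, b) = pair_model a b := by
  have hp : pairsB = [('A', 'T'), ('T', 'A'), ('C', 'G'), ('G', 'C')] := by decide
  rw [hp]
  simp only [PySem.Set.contains, List.contains_cons, List.contains_nil, Bool.or_false,
    pair_model]
  split_ifs <;> simp_all [Prod.ext_iff]

lemma goodP_eq (cs : List Char) (i : Nat) (h1 : i < cs.length)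
    (h2 : cs.length - 1 - i < cs.length) :
    goodP cs i = pair_model (cs[i]'h1) (cs[cs.length - 1 - i]'h2) := by
  unfold goodP
  rw [List.getElem?_eq_getElem h1, List.getElem?_eq_getElem h2]

lemma ansAux_lb (cs : List Char) (k : Nat) : k ≤ ansAux cs k := by
  rw [ansAux]
  split_ifs with h1 h2
  · exact le_trans (by omega) (ansAux_lb cs (k + 1))
  · exact le_refl _
  · exact le_refl _
termination_by cs.length / 2 - k

lemma ansAux_ub (cs : List Char) (k : Nat) (hk : k ≤ cs.length / 2) :
    ansAux cs k ≤ cs.length / 2 := by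
  rw [ansAux]
  split_ifs with h1 h2
  · exact ansAux_ub cs (k + 1) (by omega)
  · omega
  · omega
termination_by cs.length / 2 - k

lemma ansAux_good (cs : List Char) (k j : Nat) (h1 : k ≤ j) (h2 : j < ansAux cs k) :
    goodP cs j = true := by
  rw [ansAux] at h2
  by_cases hc : k < cs.length / 2
  · rw [if_pos hc] at h2
    by_cases hg : goodP cs k = true
    · rw [if_pos hg] at h2
      rcases Nat.eq_or_lt_of_le h1 with rfl | hlt
      · exact hg
      · exact ansAux_good cs (k + 1) j hlt h2
    · simp [hg] at h2; omega
  · rw [if_neg hc] at h2; omega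
termination_by cs.length / 2 - k

lemma ansAux_ge (cs : List Char) (j : Nat) : ∀ (k : Nat), k ≤ j → j ≤ cs.length / 2 →
    (∀ i, k ≤ i → i < j → goodP cs i = true) → j ≤ ansAux cs k := by
  intro k h1 h2 hg
  rcases Nat.eq_or_lt_of_le h1 with rfl | hlt
  · exact ansAux_lb cs k
  · rw [ansAux, if_pos (by omega), if_pos (hg k (le_refl _) hlt)]
    exact ansAux_ge cs j (k + 1) hlt h2 (fun i hi hij => hg i (by omega) hij)
termination_by k => cs.length / 2 - k

-- A's loop computes ansAux
lemma zipA_eq (cs : List Char) : ∀ (fuel : Nat) (k : Nat), cs.length / 2 - k < fuel →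
    k ≤ cs.length / 2 →
    zipLoopA cs fuel (k : Int) (-(1 + (k : Int))) true = (ansAux cs k : Int) := by
  intro fuel
  induction fuel with
  | zero => intro k h hk; omega
  | succ f ih =>
    intro k h hk
    rw [zipLoopA, ansAux]
    by_cases hc : k < cs.length / 2
    · have hkL : k < cs.length := by omega
      have hkL2 : k + 1 ≤ cs.length := by omega
      have hiL : cs.length - 1 - k < cs.length := by omega
      rw [if_pos ⟨by omega, rfl⟩]
      have e1 : PySem.List.pyGet? cs (k : Int) = some (cs[k]'hkL) := by
        rw [PySem.List.pyGet?_natCast, List.getElem?_eq_getElem hkL]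
      have e2 : PySem.List.pyGet? cs (-(1 + (k : Int))) = some (cs[cs.length - 1 - k]'hiL) := by
        rw [show -(1 + (k : Int)) = -(((k + 1 : Nat)) : Int) from by push_cast; ring]
        rw [PySem.List.pyGet?_neg_natCast cs (k + 1) (by omega) hkL2]
        rw [show cs.length - (k + 1) = cs.length - 1 - k from by omega]
        exact List.getElem?_eq_getElem hiL
      simp only [e1, e2]
      rw [goodP_eq cs k hkL hiL]
      by_cases hp : pair_model (cs[k]'hkL) (cs[cs.length - 1 - k]'hiL) = true
      · rw [if_pos hp, if_pos hc, if_pos hp]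
        rw [show (k : Int) + 1 = ((k + 1 : Nat) : Int) from by push_cast; ring,
            show -(1 + (k : Int)) - 1 = -(1 + ((k + 1 : Nat) : Int)) from by push_cast; ring]
        exact ih (k + 1) (by omega) (by omega)
      · rw [if_neg hp, if_pos hc, if_neg hp]
        cases f with
        | zero => rfl
        | succ f' => rw [zipLoopA, if_neg (by simp)]
    · have hnc : ¬ (2 * (k : Int) < (cs.length : Int) - 1 ∧ true = true) := by
        intro hcc; have := hcc.1; omega
      rw [if_neg hnc, if_neg hc]

-- okB for a Nat index k ≤ len/2 is exactly "the first k pairs all bond"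
lemma okB_iff (cs : List Char) (k : Nat) (hk : k ≤ cs.length / 2) :
    okB cs (k : Int) = true ↔ ∀ i < k, goodP cs i = true := by
  unfold okB
  rw [List.all_eq_true]
  constructor
  · intro h i hik
    have hiL : i < cs.length := by omega
    have hiL2 : cs.length - 1 - i < cs.length := by omega
    have hm : ((i : Int)) ∈ PySem.List.pyRange 0 (k : Int) 1 :=
      PySem.List.mem_pyRange_one.mpr ⟨by omega, by omega⟩
    have hx := h _ hm
    rw [PySem.List.pyGet?_natCast, List.getElem?_eq_getElem hiL] at hx
    rw [show (cs.length : Int) - 1 - (i : Int) = ((cs.length - 1 - i : Nat) : Int) from by omega,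
        PySem.List.pyGet?_natCast, List.getElem?_eq_getElem hiL2] at hx
    rw [goodP_eq cs i hiL hiL2, ← set_contains_eq_pair_model]
    exact hx
  · intro h x hx
    obtain ⟨hx0, hxk⟩ := PySem.List.mem_pyRange_one.mp hx
    have hik : x.toNat < k := by omega
    have hiL : x.toNat < cs.length := by omega
    have hiL2 : cs.length - 1 - x.toNat < cs.length := by omega
    have hxe : x = ((x.toNat : Nat) : Int) := by omega
    rw [hxe, PySem.List.pyGet?_natCast, List.getElem?_eq_getElem hiL]
    rw [show (cs.length : Int) - 1 - ((x.toNat : Nat) : Int) =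
        ((cs.length - 1 - x.toNat : Nat) : Int) from by omega,
        PySem.List.pyGet?_natCast, List.getElem?_eq_getElem hiL2]
    have := h x.toNat hik
    rw [goodP_eq cs x.toNat hiL hiL2, ← set_contains_eq_pair_model] at this
    exact this

-- B's binary search finds ansAux cs 0
lemma bsearch_eq (cs : List Char) : ∀ (fuel : Nat) (lo hi : Int), (hi - lo).toNat < fuel →
    0 ≤ lo → lo ≤ (ansAux cs 0 : Int) → (ansAux cs 0 : Int) ≤ hi →
    hi ≤ ((cs.length / 2 : Nat) : Int) → bsearchB cs fuel lo hi = (ansAux cs 0 : Int) := by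
  intro fuel
  induction fuel with
  | zero => intro lo hi hd h0 hlo hhi hcap; omega
  | succ f ih =>
    intro lo hi hd h0 hlo hhi hcap
    rw [bsearchB]
    by_cases hlh : lo < hi
    · rw [if_pos hlh]
      have hmide : PySem.Int.floordiv (lo + hi + 1) 2 = (lo + hi + 1) / 2 :=
        PySem.Int.floordiv_eq_ediv_of_pos (by norm_num)
      set mid := PySem.Int.floordiv (lo + hi + 1) 2 with hmid
      have hm1 : lo < mid := by omega
      have hm2 : mid ≤ hi := by omega
      have hmn : mid = ((mid.toNat : Nat) : Int) := by omega
      have hmcap : mid.toNat ≤ cs.length / 2 := by omega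
      by_cases hok : mid.toNat ≤ ansAux cs 0
      · have hokb : okB cs mid = true := by
          rw [hmn]
          exact (okB_iff cs mid.toNat hmcap).mpr
            (fun i hi => ansAux_good cs 0 i (by omega) (by omega))
        rw [if_pos hokb]
        exact ih mid hi (by omega) (by omega) (by omega) hhi hcap
      · have hokb : ¬ okB cs mid = true := by
          rw [hmn]
          intro hcc
          have hall := (okB_iff cs mid.toNat hmcap).mp hcc
          have := ansAux_ge cs mid.toNat 0 (by omega) hmcap (fun i _ hij => hall i hij)
          omega
        rw [if_neg hokb]
        exact ih lo (mid - 1) (by omega) h0 hlo (by omega) (by omega)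
    · rw [if_neg hlh]
      omega

-- ===== VERDICT =====
theorem zip_length_spec : Claim_equal_zip_length := by
  intro gene _
  unfold Spec_zip_length zip_length zip_length_alt
  have hfd : PySem.Int.floordiv ((gene.toList.length : Nat) : Int) 2 =
      ((gene.toList.length / 2 : Nat) : Int) := by
    rw [PySem.Int.floordiv_eq_ediv_of_pos (by norm_num)]; omega
  have hA := zipA_eq gene.toList (gene.toList.length + 1) 0 (by omega) (by omega)
  simp only [Nat.cast_zero, add_zero] at hA
  rw [hA]
  show (((ansAux gene.toList 0 : Nat) : Int)) =
    bsearchB gene.toList ((PySem.Int.floordiv ((gene.toList.length : Nat) : Int) 2).toNat + 1) 0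
      (PySem.Int.floordiv ((gene.toList.length : Nat) : Int) 2)
  rw [hfd]
  have hcap := ansAux_ub gene.toList 0 (by omega)
  exact (bsearch_eq gene.toList (((gene.toList.length / 2 : Nat) : Int).toNat + 1) 0 _
    (by omega) (by omega) (by omega) (by omega) (by omega)).symm
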